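-- pv_equiv track=rewrite | github.com/jobini/codingbat | warmup2-last2.py | last2
-- ===== SOURCE A (Python) =====
-- def last2(str):
--     if str == "":
--         return 0
--     else:
--         last2char = str[-2:]
--         count = 0
--         for i in range(0,len(str)):
--             if str.find(last2char,i,i+2) != -1:
--                 count += 1
--         return count - 1
-- ===== SOURCE B (Python) =====
-- def last2(str):
--     if len(str) < 2:
--         return 0
--     last2char = str[-2:]
--     count = 0
--     pos = 0
--     while True:
--         i = str.find(last2char, pos)
--         if i == -1:
--             return count - 1
--         count += 1
--         pos = i + 1
-- ===== Notes on version B (the rewrite author's own statement) =====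
-- stated objective: alternative
-- what changed: A runs a bounded str.find at every single index of the string (a Python-level loop of n iterations); B does a skip-scan: a while loop that calls str.find(last2char, pos) to jump directly from one occurrence of the final two characters to the next, counting hits until find returns -1.
import Mathlib
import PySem

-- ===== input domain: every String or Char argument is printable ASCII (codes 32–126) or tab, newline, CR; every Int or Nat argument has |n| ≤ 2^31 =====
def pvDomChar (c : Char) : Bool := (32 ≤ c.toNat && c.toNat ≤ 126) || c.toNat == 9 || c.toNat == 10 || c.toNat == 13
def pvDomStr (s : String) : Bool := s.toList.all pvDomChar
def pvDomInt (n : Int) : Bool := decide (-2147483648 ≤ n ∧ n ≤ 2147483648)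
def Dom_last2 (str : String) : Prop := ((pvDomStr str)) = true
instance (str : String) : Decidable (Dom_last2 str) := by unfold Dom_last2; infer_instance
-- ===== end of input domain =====

-- B replaces A's per-index scan (a bounded find at every position) by a while-loop that jumps
-- from one occurrence of the last two characters to the next via str.find(sub, pos) (objective: alternative).

-- ===== PORT A =====
def last2 (str : String) : Int :=
  if str == "" then 0
  else
    let last2char := PySem.Str.slice str (some (-2)) none
    let count : Int :=
      (PySem.List.pyRange 0 (PySem.Str.len str)).foldl
        (fun count i =>
          if PySem.Str.findFrom str last2char i (some (i + 2)) ≠ -1 then count + 1 else count)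
        0
    count - 1

-- ===== PORT B =====
-- B-side helpers: findFrom called with a start past the end answers -1 …
theorem pv_find_past (cs t : List Char) (pos : Nat) (h : cs.length < pos) :
    PySem.Chars.findFrom cs t (pos : Int) none = -1 := by
  unfold PySem.Chars.findFrom
  have h0 : ¬ ((pos : Int) < 0) := by omega
  simp only [h0, if_false]
  rw [if_pos (by exact_mod_cast h)]

-- … hence a hit bounds the start by the length and by the hit (cited by pv_skip's decreasing_by)
theorem pv_find_bounds (cs t : List Char) (pos : Nat)
    (h : PySem.Chars.findFrom cs t (pos : Int) none ≠ -1) :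
    pos ≤ cs.length ∧ (pos : Int) ≤ PySem.Chars.findFrom cs t (pos : Int) none := by
  by_cases hle : pos ≤ cs.length
  · exact ⟨hle, (PySem.Chars.findFrom_natCast_spec cs t pos hle h).1⟩
  · exact absurd (pv_find_past cs t pos (by omega)) h

-- Source B's while-True loop: i = str.find(last2char, pos); stop on -1, else count and rescan from i+1
def pv_skip (cs t : List Char) (pos : Nat) (count : Int) : Int :=
  if h : PySem.Chars.findFrom cs t (pos : Int) none = -1 then count - 1
  else pv_skip cs t ((PySem.Chars.findFrom cs t (pos : Int) none).toNat + 1) (count + 1)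
termination_by cs.length + 1 - pos
decreasing_by
  have hb := pv_find_bounds cs t pos h
  omega

def last2_alt (str : String) : Int :=
  if PySem.Str.len str < 2 then 0
  else
    let last2char := PySem.Str.slice str (some (-2)) none
    pv_skip str.toList last2char.toList 0 0

-- ===== PRECONDITION & SPEC =====
def Spec_last2 (str : String) (out : Int) : Prop := out = last2_alt str
instance (str : String) (out : Int) : Decidable (Spec_last2 str out) := by unfold Spec_last2; infer_instance

-- ===== CLAIM (what is proved, stated in full; the proofs are below) =====
def Claim_equal_last2 : Prop := ∀ (str : String), Dom_last2 str → Spec_last2 str (last2 str)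

-- ===== LEMMAS AND PROOFS =====

-- the 2-character window Python's str.find(sub, i, i+2) searches inside
theorem pv_window (cs : List Char) (k : Nat) (hk : k < cs.length) (e : Int)
    (he : e = if (cs.length : Int) < (k : Int) + 2 then (cs.length : Int) else (k : Int) + 2) :
    List.drop k (List.take e.toNat cs) = List.take 2 (List.drop k cs) := by
  subst he
  split_ifs with h
  · simp only [Int.toNat_natCast, List.take_length]
    rw [List.take_of_length_le (by simp; omega)]
  · have h2 : ((k : Int) + 2).toNat = k + 2 := by omega
    rw [h2, List.drop_take]
    norm_num

-- A's loop test at index k, characterised as "the two-char pattern starts at k"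
theorem pv_findFrom_iff (cs p : List Char) (hp : p.length = 2) (k : Nat) (hk : k < cs.length) :
    (PySem.Chars.findFrom cs p (k : Int) (some ((k : Int) + 2)) ≠ -1)
      ↔ p <+: List.drop k cs := by
  unfold PySem.Chars.findFrom
  have hst : ¬ ((k : Int) < 0) := by omega
  have hee : ¬ ((k : Int) + 2 < 0) := by omega
  simp only [hst, if_false, hee, Int.toNat_natCast]
  set e : Int := if (cs.length : Int) < (k : Int) + 2 then (cs.length : Int) else (k : Int) + 2 with he
  have hlt : ¬ (e < (k : Int)) := by rw [he]; split_ifs <;> omega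
  simp only [hlt, if_false]
  rw [pv_window cs k hk e he]
  set w := List.take 2 (List.drop k cs) with hw
  have hwlen : w.length ≤ 2 := by simp [hw]
  have hiff : p <+: List.drop k cs ↔ w = p := by
    rw [List.prefix_iff_eq_take, hp, hw, eq_comm]
  rw [hiff]
  constructor
  · intro h
    split_ifs at h with h2
    · exact absurd rfl h
    · have hinf : p <:+: w := by
        by_contra hc
        exact h2 ((PySem.Chars.find_eq_neg_one_iff w p).2 hc)
      exact (List.IsInfix.eq_of_length_le hinf (by omega)).symm
  · intro h
    have hinf : p <:+: w := h ▸ List.infix_rfl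
    have hr : PySem.Chars.find w p ≠ -1 := fun h0 =>
      ((PySem.Chars.find_eq_neg_one_iff w p).1 h0) hinf
    have hge := PySem.Chars.neg_one_le_find w p
    simp only [ne_eq]
    rw [if_neg hr]
    omega

-- A's value at length 1 : the single character is found at index 0
theorem pv_one (c : Char) : PySem.Chars.findFrom [c] [c] 0 (some 2) ≠ -1 := by
  unfold PySem.Chars.findFrom
  norm_num
  exact fun h0 => ((PySem.Chars.find_eq_neg_one_iff [c] [c]).1 h0) List.infix_rfl

-- the skip loop counts the occurrences at indices ≥ pos (and subtracts one)
theorem pv_skip_eq (cs t : List Char) (ht : t ≠ []) (pos : Nat) (count : Int) :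
    pv_skip cs t pos count
      = count + ((List.range' pos (cs.length - pos)).countP
          (fun k => decide (t <+: List.drop k cs)) : Int) - 1 := by
  by_cases h : PySem.Chars.findFrom cs t (pos : Int) none = -1
  · rw [pv_skip, dif_pos h]
    have hz : (List.range' pos (cs.length - pos)).countP
        (fun k => decide (t <+: List.drop k cs)) = 0 := by
      rw [List.countP_eq_zero]
      intro k hkmem
      by_cases hle : pos ≤ cs.length
      · have hnin : ¬ t <:+: List.drop pos cs :=
          (PySem.Chars.findFrom_natCast_eq_neg_one_iff cs t pos hle).1 h
        simp only [decide_eq_true_eq]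
        intro hpre
        apply hnin
        have hkp : pos ≤ k := (List.mem_range'_1.1 hkmem).1
        have hdrop : List.drop k cs = List.drop (k - pos) (List.drop pos cs) := by
          rw [List.drop_drop]
          congr 1
          omega
        exact List.IsInfix.trans (hdrop ▸ hpre.isInfix) (List.drop_suffix _ _).isInfix
      · have : cs.length - pos = 0 := by omega
        rw [this] at hkmem
        simp at hkmem
    rw [hz]
    norm_num
  · have hb := pv_find_bounds cs t pos h
    have hle : pos ≤ cs.length := hb.1
    obtain ⟨hjge, hjpre, hjmin⟩ := PySem.Chars.findFrom_natCast_spec cs t pos hle h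
    set j := (PySem.Chars.findFrom cs t (pos : Int) none).toNat with hj
    have hposj : pos ≤ j := by omega
    have hjlt : j < cs.length := by
      have hlen := hjpre.length_le
      rw [List.length_drop] at hlen
      have ht0 : 0 < t.length := List.length_pos_of_ne_nil ht
      omega
    rw [pv_skip, dif_neg h, pv_skip_eq cs t ht (j + 1) (count + 1)]
    have hsplit : List.range' pos (cs.length - pos)
        = List.range' pos (j - pos) ++ List.range' j (cs.length - j) := by
      rw [show cs.length - pos = j - pos + (cs.length - j) by omega,
          ← List.range'_append_1, show pos + (j - pos) = j by omega]
    have hcons : List.range' j (cs.length - j)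
        = j :: List.range' (j + 1) (cs.length - (j + 1)) := by
      rw [show cs.length - j = (cs.length - (j + 1)) + 1 by omega, List.range'_succ]
    rw [hsplit, List.countP_append, hcons, List.countP_cons]
    have hzero : (List.range' pos (j - pos)).countP
        (fun k => decide (t <+: List.drop k cs)) = 0 := by
      rw [List.countP_eq_zero]
      intro k hkmem
      obtain ⟨hk1, hk2⟩ := List.mem_range'_1.1 hkmem
      simp only [decide_eq_true_eq]
      exact hjmin k hk1 (by omega)
    have hhit : decide (t <+: List.drop j cs) = true := decide_eq_true hjpre
    rw [hzero]
    simp only [hhit, if_pos]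
    push_cast
    ring
termination_by cs.length + 1 - pos
decreasing_by
  have := pv_find_bounds cs t pos h
  omega

theorem pv_main (str : String) : last2 str = last2_alt str := by
  unfold last2 last2_alt
  rcases h0 : str.toList with _ | ⟨c, cs0⟩
  · -- empty string
    have : str = "" := String.toList_inj.mp (by simp [h0])
    subst this
    simp [PySem.Str.len]
  · rcases h1 : cs0 with _ | ⟨d, cs1⟩
    · -- length 1
      subst h1
      have hne : (str == "") = false := by
        simp only [beq_eq_false_iff_ne, ne_eq]
        intro h; rw [h] at h0; simp at h0
      have hlen : PySem.Str.len str = 1 := by rw [PySem.Str.len_eq, h0]; rfl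
      rw [hne, hlen]
      have hsl : PySem.List.slice [c] (some (-2)) none = [c] := by
        rw [PySem.List.slice_from_neg_ofNat _ 2 (by norm_num)]
        rfl
      have hpr : PySem.List.pyRange 0 1 = [(0 : Int)] := by decide
      simp only [Bool.false_eq_true, if_false, hpr, List.foldl_cons, List.foldl_nil,
        PySem.Str.findFrom_eq, PySem.Str.toList_slice, PySem.Chars.slice_eq_listSlice, h0, hsl]
      norm_num
      rw [if_neg (pv_one c)]
      norm_num
    · -- length ≥ 2
      subst h1
      have hne : (str == "") = false := by
        simp only [beq_eq_false_iff_ne, ne_eq]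
        intro h; rw [h] at h0; simp at h0
      set n := cs1.length with hn1
      have hn : str.toList.length = n + 2 := by rw [h0]; simp [hn1]
      have hlen : PySem.Str.len str = ((n + 2 : Nat) : Int) := by rw [PySem.Str.len_eq, hn]
      set L := PySem.Str.slice str (some (-2)) none with hL
      set p := List.drop n str.toList with hpdef
      have hptl : L.toList = p := by
        rw [hL, PySem.Str.toList_slice, PySem.Chars.slice_eq_listSlice,
            PySem.List.slice_from_neg_ofNat _ 2 (by norm_num), hn, Nat.add_sub_cancel]
      have hplen : p.length = 2 := by rw [hpdef, List.length_drop, hn]; omega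
      set q : Nat → Bool := fun k => decide (p <+: List.drop k str.toList) with hq
      -- A side
      rw [hne, hlen]
      simp only [Bool.false_eq_true, if_false]
      rw [PySem.List.pyRange_zero_natCast, List.foldl_map]
      have hcong : ∀ (acc : Int), ∀ x ∈ List.range (n + 2),
          (if PySem.Str.findFrom str L (x : Int) (some ((x : Int) + 2)) ≠ -1 then acc + 1 else acc)
          = (fun (count : Int) (k : Nat) => if q k = true then count + 1 else count) acc x := by
        intro acc x hx
        have hk : x < n + 2 := List.mem_range.mp hx
        have hiff := pv_findFrom_iff str.toList p hplen x (by omega)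
        rw [PySem.Str.findFrom_eq, hptl]
        simp only [hq, decide_eq_true_eq]
        exact if_congr hiff rfl rfl
      rw [PySem.List.foldl_congr_mem _ _ _ _ hcong]
      rw [PySem.List.foldl_count_if]
      -- B side
      rw [if_neg (by push_cast; omega)]
      rw [hptl, pv_skip_eq (c :: d :: cs1) p (by intro hc; rw [hc] at hplen; simp at hplen) 0 0]
      rw [Nat.sub_zero, show (c :: d :: cs1).length = n + 2 by simp [hn1],
          ← List.range_eq_range']
      simp only [hq, h0]

-- ===== VERDICT (by name: the statement is the Claim_ definition above) =====
theorem last2_spec : Claim_equal_last2 := by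
  intro str _
  unfold Spec_last2
  exact pv_main str
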